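-- pv_equiv track=rewrite | github.com/daniel-reich/ubiquitous-fiesta | eMRXLJLpaSTxZvsKN_13.py | is_ladder_safe
-- ===== SOURCE A (Python) =====
-- def is_ladder_safe(ldr):
--     if any(' ' in ldr[i] and ' ' in ldr[i+1] and ' ' in ldr[i+2] for i in range(len(ldr)-2)):
--         return False
--     if ldr[:len(ldr)//2] != ldr[len(ldr)//2+1:][::-1]:
--         return False
--     if len([i for i in ldr[:len(ldr)//2] if ' ' in i ]) % 2 == 0:
--         return False
--     for i in ldr:
--         if len(i) < 5:
--             return False
--     return True
-- ===== SOURCE B (Python) =====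
-- def is_ladder_safe(ldr):
--     half = len(ldr) // 2
--     if ldr[:half] != ldr[half+1:][::-1]:
--         return False
--     run = 0
--     cnt = 0
--     for i, rung in enumerate(ldr):
--         if len(rung) < 5:
--             return False
--         if ' ' in rung:
--             run += 1
--             if run == 3:
--                 return False
--             if i < half:
--                 cnt += 1
--         else:
--             run = 0
--     return cnt % 2 == 1
-- ===== Notes on version B (the rewrite author's own statement) =====
-- stated objective: alternative
-- what changed: A's three separate scans over the rungs (the triple-consecutive-space 'any' over indices, the first-half space count, and the min-length loop) are fused into one forward pass that maintains a running count of consecutive space rungs, a first-half space counter and the length check together; the slice-based palindrome test is kept as-is.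
import Mathlib
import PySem

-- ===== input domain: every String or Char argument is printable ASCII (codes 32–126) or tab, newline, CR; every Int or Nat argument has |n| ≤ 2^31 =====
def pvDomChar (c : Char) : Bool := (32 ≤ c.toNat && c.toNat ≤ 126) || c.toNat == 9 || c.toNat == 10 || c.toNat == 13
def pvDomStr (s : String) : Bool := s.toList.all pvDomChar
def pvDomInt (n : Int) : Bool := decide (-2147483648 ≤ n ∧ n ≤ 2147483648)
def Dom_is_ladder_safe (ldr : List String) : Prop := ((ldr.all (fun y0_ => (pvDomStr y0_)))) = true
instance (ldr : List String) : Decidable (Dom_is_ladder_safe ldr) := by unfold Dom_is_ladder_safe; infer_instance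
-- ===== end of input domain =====

-- B re-implements A's four separate scans as one forward pass (running count of consecutive
-- space rungs, first-half space counter and min-length check in a single loop), keeping the
-- slice-based palindrome test; same asymptotic cost, different decomposition.

-- ===== PORT A =====

-- A's final 'for i in ldr: if len(i) < 5: return False' loop
def aLenLoop : List String → Bool
  | [] => true
  | r :: rest => if PySem.Str.len r < 5 then false else aLenLoop rest

def is_ladder_safe (ldr : List String) : Bool :=
  -- any(' ' in ldr[i] and ' ' in ldr[i+1] and ' ' in ldr[i+2] for i in range(len(ldr)-2))
  if (PySem.List.pyRange 0 (PySem.List.len ldr - 2) 1).any (fun i =>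
       PySem.Str.isIn " " (PySem.List.pyGetD ldr i "") &&
       PySem.Str.isIn " " (PySem.List.pyGetD ldr (i + 1) "") &&
       PySem.Str.isIn " " (PySem.List.pyGetD ldr (i + 2) "")) then false
  -- ldr[:len(ldr)//2] != ldr[len(ldr)//2+1:][::-1]   ([::-1] is .reverse: slice?_none_none_neg_one)
  else if PySem.List.slice ldr none (some (PySem.Int.floordiv (PySem.List.len ldr) 2)) ≠
          (PySem.List.slice ldr (some (PySem.Int.floordiv (PySem.List.len ldr) 2 + 1)) none).reverse then false
  -- len([i for i in ldr[:len(ldr)//2] if ' ' in i]) % 2 == 0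
  else if ((PySem.List.slice ldr none (some (PySem.Int.floordiv (PySem.List.len ldr) 2))).filter
             (fun i => PySem.Str.isIn " " i)).length % 2 == 0 then false
  else aLenLoop ldr

-- ===== PORT B =====

-- the single forward pass of Source B: (i, rung) from enumerate, run = consecutive space rungs,
-- cnt = space rungs seen at index < half
def altLoop (half : Int) : List (Int × String) → Nat → Nat → Bool
  | [], _, cnt => cnt % 2 == 1
  | (i, rung) :: rest, run, cnt =>
    if PySem.Str.len rung < 5 then false
    else if PySem.Str.isIn " " rung then
      if run + 1 == 3 then false
      else altLoop half rest (run + 1) (if i < half then cnt + 1 else cnt)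
    else altLoop half rest 0 cnt

def is_ladder_safe_alt (ldr : List String) : Bool :=
  let half := PySem.Int.floordiv (PySem.List.len ldr) 2
  -- ldr[:half] != ldr[half+1:][::-1]   ([::-1] is .reverse: slice?_none_none_neg_one)
  if PySem.List.slice ldr none (some half) ≠
     (PySem.List.slice ldr (some (half + 1)) none).reverse then false
  else altLoop half (PySem.List.enumerate ldr 0) 0 0

-- ===== PRECONDITION & SPEC =====
def Spec_is_ladder_safe (ldr : List String) (out : Bool) : Prop := out = is_ladder_safe_alt ldr
instance (ldr : List String) (out : Bool) : Decidable (Spec_is_ladder_safe ldr out) := by unfold Spec_is_ladder_safe; infer_instance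

-- ===== CLAIM (what is proved, stated in full; the proofs are below) =====
def Claim_equal_is_ladder_safe : Prop := ∀ (ldr : List String), Dom_is_ladder_safe ldr → Spec_is_ladder_safe ldr (is_ladder_safe ldr)

-- ===== LEMMAS AND PROOFS =====

-- abbreviations for the proof
def sp (r : String) : Bool := PySem.Str.isIn " " r
def longB (r : String) : Bool := !(PySem.Str.len r < 5)

-- three consecutive true flags, structural form
def tripleF : List Bool → Bool
  | a :: b :: c :: rs => (a && b && c) || tripleF (b :: c :: rs)
  | _ => false

-- B's running-run detector, on the flag list
def runF : Nat → List Bool → Bool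
  | _, [] => false
  | run, f :: fs => if f then ((run + 1 == 3) || runF (run + 1) fs) else runF 0 fs

-- B's first-half space counter
def toggles (s half : Int) : List String → Nat
  | [] => 0
  | r :: rs => (if sp r && decide (s < half) then 1 else 0) + toggles (s + 1) half rs

theorem aLenLoop_eq_all (l : List String) : aLenLoop l = l.all longB := by
  induction l with
  | nil => rfl
  | cons r rs ih =>
    by_cases h : PySem.Str.len r < 5
    · have h' : r.length < 5 := by rw [PySem.Str.len_eq] at h; exact_mod_cast h
      simp [aLenLoop, longB, h']
    · have h' : ¬ r.length < 5 := by
        intro hc; apply h; rw [PySem.Str.len_eq]; exact_mod_cast hc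
      simp [aLenLoop, longB, h', ih]

theorem tripleF_false_cons (fs : List Bool) : tripleF (false :: fs) = tripleF fs := by
  match fs with
  | [] => rfl
  | [a] => rfl
  | a :: b :: rs => simp [tripleF]

theorem tripleF_false_cons1 (x : Bool) (fs : List Bool) :
    tripleF (x :: false :: fs) = tripleF fs := by
  match fs with
  | [] => rfl
  | c :: rs => simp [tripleF, tripleF_false_cons]

theorem tripleF_false_cons2 (x y : Bool) (fs : List Bool) :
    tripleF (x :: y :: false :: fs) = tripleF fs := by
  simp [tripleF, tripleF_false_cons1]

theorem runF_eq_tripleF (l : List String) :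
    ∀ run : Nat, run ≤ 2 →
      runF run (l.map sp) = tripleF (List.replicate run true ++ l.map sp) := by
  induction l with
  | nil =>
    intro run h
    interval_cases run <;> rfl
  | cons r rs ih =>
    intro run h
    by_cases hs : sp r = true
    · simp only [List.map_cons, runF, hs]
      by_cases h2 : run = 2
      · subst h2; simp [tripleF]
      · have h3 : (run + 1 == 3) = false := by
          simp only [beq_eq_false_iff_ne, ne_eq]; omega
        have hrep : List.replicate run true ++ true :: rs.map sp
            = List.replicate (run + 1) true ++ rs.map sp := by
          rw [List.replicate_succ', List.append_assoc]; rfl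
        rw [h3, Bool.false_or, hrep, ih (run + 1) (by omega)]
        simp
    · have hs' : sp r = false := by simp [Bool.not_eq_true] at hs; exact hs
      simp only [List.map_cons, runF, hs', Bool.false_eq_true, if_false, ih 0 (by omega),
                 List.replicate_zero, List.nil_append]
      interval_cases run
      · simpa using (tripleF_false_cons (rs.map sp)).symm
      · simpa [List.replicate] using (tripleF_false_cons1 true (rs.map sp)).symm
      · simpa [List.replicate] using (tripleF_false_cons2 true true (rs.map sp)).symm

theorem toggles_eq_count (l : List String) :
    ∀ i h : Nat, toggles (i : Int) (h : Int) l = ((l.take (h - i)).filter sp).length := by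
  induction l with
  | nil => intro i h; simp [toggles]
  | cons r rs ih =>
    intro i h
    have hcast : (i : Int) + 1 = ((i + 1 : Nat) : Int) := by push_cast; ring
    simp only [toggles, hcast, ih (i + 1) h]
    by_cases hih : i < h
    · have h1 : h - i = (h - (i + 1)) + 1 := by omega
      have hc : ((i : Int) < (h : Int)) := by exact_mod_cast hih
      rw [h1]
      by_cases hsr : sp r = true
      · simp [hsr, hc, List.take_succ_cons]
        omega
      · simp [hsr, hc, List.take_succ_cons]
    · have h0 : h - i = 0 := by omega
      have h1 : h - (i + 1) = 0 := by omega
      have hc : ¬((i : Int) < (h : Int)) := by exact_mod_cast hih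
      simp [h0, h1, hc]

theorem altLoop_eq (l : List String) :
    ∀ (s half : Int) (run cnt : Nat),
      altLoop half (PySem.List.enumerate l s) run cnt =
        (l.all longB && !runF run (l.map sp) &&
          ((cnt + toggles s half l) % 2 == 1)) := by
  induction l with
  | nil => intro s half run cnt; simp [PySem.List.enumerate_nil, altLoop, runF, toggles]
  | cons r rs ih =>
    intro s half run cnt
    rw [PySem.List.enumerate_cons]
    have hL : PySem.Str.len r < 5 ↔ r.length < 5 := by
      rw [PySem.Str.len_eq]; simp
    by_cases hlen : r.length < 5
    · simp [altLoop, hlen, longB]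
    · have hlen' : ¬ PySem.Str.len r < 5 := fun hc => hlen (hL.mp hc)
      by_cases hs : sp r = true
      · have hsC : PySem.Chars.isIn [' '] r.toList = true := by
          simpa [sp] using hs
        by_cases h3 : run = 2
        · simp [altLoop, hlen, longB, hs, hsC, runF, h3]
        · have h3' : (run == 2) = false := by simpa using h3
          by_cases hsh : s < half
          · simp [altLoop, hlen, longB, hs, hsC, runF, toggles, h3', hsh, ih,
                  Nat.add_comm, Nat.add_left_comm]
          · simp [altLoop, hlen, longB, hs, hsC, runF, toggles, h3', hsh, ih]
      · have hs0 : sp r = false := by simpa using hs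
        have hsC : PySem.Chars.isIn [' '] r.toList = false := by
          simpa [sp] using hs0
        simp [altLoop, hlen, longB, hs0, hsC, runF, toggles, ih]

-- index-level form of A's triple-space scan equals the structural form
theorem rangeAny_eq_tripleF (l : List String) :
    (List.range (l.length - 2)).any (fun k : Nat =>
        sp (l.getD k "") && sp (l.getD (k + 1) "") && sp (l.getD (k + 2) "")) =
      tripleF (l.map sp) := by
  match l with
  | [] => rfl
  | [a] => rfl
  | [a, b] => rfl
  | a :: b :: c :: rs =>
    have hlen : (a :: b :: c :: rs).length - 2 = rs.length + 1 := by simp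
    rw [hlen, List.range_succ_eq_map, List.any_cons, List.any_map]
    have htail := rangeAny_eq_tripleF (b :: c :: rs)
    have hlen' : (b :: c :: rs).length - 2 = rs.length := by simp
    rw [hlen'] at htail
    have hcomp : ((fun k : Nat =>
        sp ((a :: b :: c :: rs).getD k "") && sp ((a :: b :: c :: rs).getD (k + 1) "") &&
          sp ((a :: b :: c :: rs).getD (k + 2) "")) ∘ Nat.succ) =
        (fun k : Nat =>
          sp ((b :: c :: rs).getD k "") && sp ((b :: c :: rs).getD (k + 1) "") &&
            sp ((b :: c :: rs).getD (k + 2) "")) := by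
      funext k; simp [Function.comp, List.getD]
    rw [hcomp, htail]
    simp [tripleF, List.getD]

theorem floordiv_len_two (n : Nat) : PySem.Int.floordiv ((n : Int)) 2 = ((n / 2 : Nat) : Int) := by
  simp only [PySem.Int.floordiv]
  rw [Int.fdiv_eq_ediv]; omega

-- ===== VERDICT (by name: the statement is the Claim_ definition above) =====
theorem is_ladder_safe_spec : Claim_equal_is_ladder_safe := by
  intro ldr _
  unfold Spec_is_ladder_safe is_ladder_safe is_ladder_safe_alt
  have hlen : PySem.List.len ldr = (ldr.length : Int) := by simp [PySem.List.len_eq]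
  rw [hlen, floordiv_len_two]
  have hhalf1 : ((ldr.length / 2 : Nat) : Int) + 1 = ((ldr.length / 2 + 1 : Nat) : Int) := by
    push_cast; ring
  rw [hhalf1, PySem.List.slice_to_natCast, PySem.List.slice_from_natCast]
  -- A's triple-space scan
  have hany : (PySem.List.pyRange 0 ((ldr.length : Int) - 2) 1).any (fun i =>
       PySem.Str.isIn " " (PySem.List.pyGetD ldr i "") &&
       PySem.Str.isIn " " (PySem.List.pyGetD ldr (i + 1) "") &&
       PySem.Str.isIn " " (PySem.List.pyGetD ldr (i + 2) "")) = tripleF (ldr.map sp) := by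
    rw [PySem.List.pyRange_one, List.any_map]
    rw [show (((ldr.length : Int) - 2 - 0).toNat) = ldr.length - 2 by omega]
    rw [← rangeAny_eq_tripleF]
    refine congrArg _ (funext fun k => ?_)
    have e0 : (0 : Int) + (k : Nat) = ((k : Nat) : Int) := by ring
    have e1 : ((k : Nat) : Int) + 1 = ((k + 1 : Nat) : Int) := by push_cast; ring
    have e2 : ((k : Nat) : Int) + 2 = ((k + 2 : Nat) : Int) := by push_cast; ring
    simp only [Function.comp, e0, e1, e2, PySem.List.pyGetD_natCast, sp]
  rw [hany]
  show _ = (if PySem.List.slice ldr none (some ((ldr.length / 2 : Nat) : Int)) ≠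
       (PySem.List.slice ldr (some (((ldr.length / 2 : Nat) : Int) + 1)) none).reverse then false
     else altLoop ((ldr.length / 2 : Nat) : Int) (PySem.List.enumerate ldr 0) 0 0)
  rw [hhalf1, PySem.List.slice_to_natCast, PySem.List.slice_from_natCast]
  -- B's loop
  rw [altLoop_eq ldr 0 ((ldr.length / 2 : Nat) : Int) 0 0,
      runF_eq_tripleF ldr 0 (by omega)]
  have hcnt := toggles_eq_count ldr 0 (ldr.length / 2)
  rw [show ((0 : Nat) : Int) = (0 : Int) by rfl, Nat.sub_zero] at hcnt
  rw [hcnt, aLenLoop_eq_all]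
  simp only [List.replicate_zero, List.nil_append, Nat.zero_add]
  have hfilter : (ldr.take (ldr.length / 2)).filter (fun i => PySem.Str.isIn " " i)
      = (ldr.take (ldr.length / 2)).filter sp := rfl
  rw [hfilter]
  -- now pure boolean/arithmetic case analysis
  split_ifs with h1 h2 h3 <;> simp_all
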